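-- pv_equiv track=rewrite | github.com/junsoopooh/Studying_Algorithm | 3기/week02/yeongseo/2.py | solution
-- ===== SOURCE A (Python) =====
-- def increment(ch, idx, skip):
--     order = ord(ch)
--     cnt = 0
--     while cnt < idx: # skip문자 제외하고 index만큼 건너뛸때까지
--         order += 1
--         if order > ord('z'): # z넘어가면 a로 돌아가게, 이걸 order += 1 바로 뒤에 둬야만 skip할때 스킵할 문자인지 제대로 판단가능
--             order = order - ord('z') + (ord('a') -1 )
--
--         if chr(order) in skip: # 건너뛴거로 치지 않음
--             continue
--
--         cnt += 1 # 건너뛴거로 침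
--
--     return chr(order) # 변경된 숫자
--
-- def solution(s, skip, index):
--     arr = [i for i in s]
--     skip = set(skip)
--     for i in range(len(arr)):
--         ch = arr[i]
--         new_ch = increment(ch, index, skip) # 변경할 문자 찾는 함수
--
--         arr[i] = new_ch
--
--     answer = ''.join(arr)
--     return answer
-- ===== SOURCE B (Python) =====
-- def solution(s, skip, index):
--     skipset = set(skip)
--     allowed = [chr(k) for k in range(97, 123) if chr(k) not in skipset]
--     m = len(allowed)
--     out = []
--     for ch in s:
--         if index <= 0:
--             out.append(ch)
--             continue
--         o = ord(ch)
--         q = o - 25 if o >= 122 else o + 1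
--         prefix = [k for k in range(q, 123) if chr(k) not in skipset]
--         if index <= len(prefix):
--             out.append(chr(prefix[index - 1]))
--         else:
--             j = index - len(prefix)
--             out.append(allowed[(j - 1) % m])
--     return ''.join(out)
-- ===== Notes on version B (the rewrite author's own statement) =====
-- stated objective: faster
-- what changed: A walks the cyclic alphabet one code at a time for every character (index iterations each); B precomputes the sorted allowed lowercase letters once and answers each character in O(1) extra work with a filtered prefix list plus modular indexing into the allowed letters.
import Mathlib
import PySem

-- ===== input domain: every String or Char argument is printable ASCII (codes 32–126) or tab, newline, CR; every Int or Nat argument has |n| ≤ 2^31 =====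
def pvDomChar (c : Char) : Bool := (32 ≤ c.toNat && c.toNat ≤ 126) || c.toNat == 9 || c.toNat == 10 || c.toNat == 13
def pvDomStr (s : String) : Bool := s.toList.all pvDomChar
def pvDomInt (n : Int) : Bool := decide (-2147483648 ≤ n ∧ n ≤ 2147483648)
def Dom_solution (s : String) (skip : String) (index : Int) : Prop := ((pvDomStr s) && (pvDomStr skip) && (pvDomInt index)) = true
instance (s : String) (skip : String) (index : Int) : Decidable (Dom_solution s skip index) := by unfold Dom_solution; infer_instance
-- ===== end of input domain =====

-- B replaces A's step-by-step walk (O(index) per character) by a closed form: a filtered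
-- prefix list up to 'z' plus modular indexing into the sorted allowed lowercase letters.

-- ===== PORT A =====
-- the wrap of A: order += 1; if order > ord('z'): order = order - ord('z') + (ord('a') - 1)
def wrapSucc (o : Nat) : Nat := if o + 1 > 122 then o + 1 - 26 else o + 1

-- A's while loop; the fuel argument only makes the recursion total (it is chosen large
-- enough that it never runs out on inputs satisfying Pre_solution).
def incLoop (skipC : List Nat) (idx : Int) : Nat → Nat → Int → Nat
  | 0, order, _ => order
  | fuel + 1, order, cnt =>
    if cnt < idx then
      let order' := wrapSucc order
      if skipC.contains order' then incLoop skipC idx fuel order' cnt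
      else incLoop skipC idx fuel order' (cnt + 1)
    else order

def solution (s : String) (skip : String) (index : Int) : String :=
  let skipC := skip.toList.map Char.toNat
  String.mk (s.toList.map (fun ch =>
    Char.ofNat (incLoop skipC index (index.toNat * 26 + 160) ch.toNat 0)))

-- ===== PORT B =====
-- allowed = sorted lowercase codes not in skip
def allowedCodes (skipC : List Nat) : List Nat :=
  (List.range' 97 26).filter (fun k => !skipC.contains k)

-- non-skip codes from q up to 122 ('z')
def prefixCodes (skipC : List Nat) (q : Nat) : List Nat :=
  (List.range' q (123 - q)).filter (fun k => !skipC.contains k)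

def solution_alt (s : String) (skip : String) (index : Int) : String :=
  let skipC := skip.toList.map Char.toNat
  let allowed := allowedCodes skipC
  let m := allowed.length
  String.mk (s.toList.map (fun ch =>
    if index ≤ 0 then ch
    else
      let o := ch.toNat
      let q := if 122 ≤ o then o - 25 else o + 1
      let P := prefixCodes skipC q
      if index ≤ (P.length : Int) then Char.ofNat (P.getD (index - 1).toNat 97)
      else Char.ofNat (allowed.getD ((index - (P.length : Int) - 1).toNat % m) 97)))

-- ===== PRECONDITION & SPEC =====
-- Pre_ excludes exactly the inputs on which A's while loop never terminates: index > 0 while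
-- skip contains all 26 lowercase letters and the finite stretch of codes strictly after the
-- character (up to 'z') holds fewer than index non-skip codes.
def Pre_solution (s : String) (skip : String) (index : Int) : Prop :=
  (s.toList.all (fun c =>
    decide (index ≤ 0) || !(allowedCodes (skip.toList.map Char.toNat)).isEmpty ||
    decide (index ≤ ((prefixCodes (skip.toList.map Char.toNat)
      (if 122 ≤ c.toNat then c.toNat - 25 else c.toNat + 1)).length : Int)))) = true
instance (s : String) (skip : String) (index : Int) : Decidable (Pre_solution s skip index) := by
  unfold Pre_solution; infer_instance

def pvWitness_solution : String × String × Int := ("ab", "b", 3)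

def Spec_solution (s : String) (skip : String) (index : Int) (out : String) : Prop := out = solution_alt s skip index
instance (s : String) (skip : String) (index : Int) (out : String) : Decidable (Spec_solution s skip index out) := by unfold Spec_solution; infer_instance

-- ===== CLAIM (what is proved, stated in full; the proofs are below) =====
def Claim_equal_solution : Prop := ∀ (s : String) (skip : String) (index : Int), Dom_solution s skip index → Pre_solution s skip index → Spec_solution s skip index (solution s skip index)

-- ===== LEMMAS AND PROOFS =====

-- the "next code" function of A's loop, as B sees it
def qc (o : Nat) : Nat := if 122 ≤ o then o - 25 else o + 1

-- B's per-character closed form with a Nat count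
def cf (skipC : List Nat) (o : Nat) : Nat → Nat
  | 0 => o
  | n + 1 =>
    let P := prefixCodes skipC (qc o)
    if n + 1 ≤ P.length then P.getD n 97
    else (allowedCodes skipC).getD ((n - P.length) % (allowedCodes skipC).length) 97

theorem wrapSucc_eq_qc (o : Nat) (h : o ≤ 126) : wrapSucc o = qc o := by
  unfold wrapSucc qc; split_ifs <;> omega

theorem qc_le (o : Nat) (h : o ≤ 126) : qc o ≤ 122 := by
  unfold qc; split_ifs <;> omega

theorem qc_of_le121 (q : Nat) (h : q ≤ 121) : qc q = q + 1 := by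
  unfold qc; split_ifs <;> omega

theorem range'_shift (q : Nat) (h : q ≤ 122) :
    List.range' q (123 - q) = q :: List.range' (q + 1) (122 - q) := by
  rw [show (123 - q) = (122 - q) + 1 by omega]
  simpa using List.range'_succ (s := q) (n := 122 - q)

-- structure of a nonempty filtered range
theorem fr_cons (f : Nat → Bool) :
    ∀ (g q p : Nat) (rest : List Nat), (List.range' q g).filter f = p :: rest →
      f p = true ∧ q ≤ p ∧ p < q + g ∧
      rest = (List.range' (p + 1) (q + g - (p + 1))).filter f := by
  intro g
  induction g with
  | zero => intro q p rest h; simp at h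
  | succ g ih =>
    intro q p rest h
    rw [show List.range' q (g+1) = q :: List.range' (q+1) g from by
      simpa using List.range'_succ (s := q) (n := g), List.filter_cons] at h
    cases hq : f q with
    | true =>
      rw [hq, if_pos rfl] at h
      have h1 : q = p := (List.cons.injEq .. ▸ h).1
      have h2 : (List.range' (q+1) g).filter f = rest := (List.cons.injEq .. ▸ h).2
      refine ⟨h1 ▸ hq, by omega, by omega, ?_⟩
      rw [← h2, ← h1, show q + (g + 1) - (q + 1) = g by omega]
    | false =>
      rw [hq] at h; simp only [Bool.false_eq_true, if_false] at h
      obtain ⟨h1, h2, h3, h4⟩ := ih (q+1) p rest h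
      refine ⟨h1, by omega, by omega, ?_⟩
      rw [h4, show q + 1 + g - (p + 1) = q + (g + 1) - (p + 1) by omega]

-- all-skip filtered range
theorem fr_nil (f : Nat → Bool) :
    ∀ (g q : Nat), (List.range' q g).filter f = [] →
      ∀ x, q ≤ x → x < q + g → f x = false := by
  intro g q h x hx1 hx2
  by_contra hns
  have hx : x ∈ List.range' q g := by rw [List.mem_range'_1]; omega
  have : x ∈ (List.range' q g).filter f := by
    rw [List.mem_filter]; exact ⟨hx, by simpa using hns⟩
  rw [h] at this; simp at this

-- head/tail structure of a nonempty prefix list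
theorem prefix_cons_elim (skipC : List Nat) (q p : Nat) (rest : List Nat)
    (hq : q ≤ 122) (hP : prefixCodes skipC q = p :: rest) :
    skipC.contains p = false ∧ q ≤ p ∧ p ≤ 122 ∧
    rest = (List.range' (p + 1) (122 - p)).filter (fun k => !skipC.contains k) := by
  obtain ⟨h1, h2, h3, h4⟩ := fr_cons _ _ _ _ _ hP
  refine ⟨by simpa using h1, h2, by omega, ?_⟩
  rw [h4, show q + (123 - q) - (p + 1) = 122 - p by omega]

-- tail of a nonempty prefix list is the next prefix list (head below 'z')
theorem prefix_tail (skipC : List Nat) (q p : Nat) (rest : List Nat)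
    (hq : q ≤ 122) (hp : p ≤ 121) (hP : prefixCodes skipC q = p :: rest) :
    prefixCodes skipC (qc p) = rest := by
  obtain ⟨_, _, _, h4⟩ := prefix_cons_elim skipC q p rest hq hP
  unfold prefixCodes
  rw [qc_of_le121 p hp, show 123 - (p + 1) = 122 - p by omega, h4]

theorem prefix_from_97 (skipC : List Nat) :
    prefixCodes skipC 97 = allowedCodes skipC := by
  unfold prefixCodes allowedCodes; norm_num

theorem qc_122 : qc 122 = 97 := by unfold qc; norm_num

-- one iteration of A's loop when the counter has reached idx
theorem incLoop_done (skipC : List Nat) (idx : Int) (fuel o : Nat) (cnt : Int)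
    (h : ¬ cnt < idx) (hf : 1 ≤ fuel) :
    incLoop skipC idx fuel o cnt = o := by
  cases fuel with
  | zero => omega
  | succ f => simp [incLoop, h]

-- A's loop runs from o to the first non-skip code p of the prefix, counting one step
theorem countStep (skipC : List Nat) (idx : Int) :
    ∀ (g o : Nat) (cnt : Int) (fuel p : Nat) (rest : List Nat),
      o ≤ 126 → 123 - qc o ≤ g → cnt < idx →
      prefixCodes skipC (qc o) = p :: rest → p + 1 - qc o ≤ fuel →
      incLoop skipC idx fuel o cnt = incLoop skipC idx (fuel - (p + 1 - qc o)) p (cnt + 1) := by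
  intro g
  induction g with
  | zero =>
    intro o cnt fuel p rest ho hg
    exfalso
    have := qc_le o ho
    omega
  | succ g ih =>
    intro o cnt fuel p rest ho hg hcnt hP hfuel
    have hq122 : qc o ≤ 122 := qc_le o ho
    obtain ⟨hfp, hqp, hp122, hrest⟩ := prefix_cons_elim skipC (qc o) p rest hq122 hP
    cases hns : skipC.contains (qc o) with
    | false =>
      -- the very first code qc o is not skipped: it is p; one counted step
      have hpq : p = qc o := by
        unfold prefixCodes at hP
        rw [range'_shift (qc o) hq122, List.filter_cons, hns] at hP
        simp only [Bool.not_false] at hP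
        exact ((List.cons.injEq .. ▸ hP).1).symm
      cases fuel with
      | zero => exfalso; omega
      | succ f =>
        simp only [incLoop, if_pos hcnt]
        rw [wrapSucc_eq_qc o ho, if_neg (by rw [hns]; simp), hpq]
        congr 1
        omega
    | true =>
      -- qc o is skipped: continue without counting
      have hpne : p ≠ qc o := by
        intro h; rw [h] at hfp; rw [hns] at hfp; simp at hfp
      have hq121 : qc o ≤ 121 := by
        by_contra h
        have hq : qc o = 122 := by omega
        rw [hq] at hns
        unfold prefixCodes at hP
        rw [hq, show (123 - 122 : Nat) = 1 from rfl,
          show List.range' 122 1 = [122] from rfl, List.filter_cons, hns] at hP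
        simp at hP
      have hP' : prefixCodes skipC (qc (qc o)) = p :: rest := by
        unfold prefixCodes at hP ⊢
        rw [range'_shift (qc o) hq122, List.filter_cons, hns] at hP
        simp only [Bool.not_true, Bool.false_eq_true, if_false] at hP
        rw [qc_of_le121 (qc o) hq121, show 123 - (qc o + 1) = 122 - qc o by omega]
        exact hP
      cases fuel with
      | zero => exfalso; omega
      | succ f =>
        simp only [incLoop, if_pos hcnt]
        rw [wrapSucc_eq_qc o ho, if_pos hns]
        rw [ih (qc o) cnt f p rest (by omega)
          (by rw [qc_of_le121 (qc o) hq121]; omega) hcnt hP'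
          (by rw [qc_of_le121 (qc o) hq121]; omega)]
        congr 1
        rw [qc_of_le121 (qc o) hq121]
        omega

-- A's loop walks through an all-skip stretch up to 'z' without counting
theorem skipAll (skipC : List Nat) (idx : Int) :
    ∀ (g o : Nat) (cnt : Int) (fuel : Nat),
      o ≤ 126 → 123 - qc o = g →
      prefixCodes skipC (qc o) = [] → g ≤ fuel → cnt < idx →
      incLoop skipC idx fuel o cnt = incLoop skipC idx (fuel - g) 122 cnt := by
  intro g
  induction g with
  | zero =>
    intro o cnt fuel ho hg
    exfalso
    have := qc_le o ho
    omega
  | succ g ih =>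
    intro o cnt fuel ho hg hP hfuel hcnt
    have hq122 : qc o ≤ 122 := qc_le o ho
    have hns : skipC.contains (qc o) = true := by
      have := fr_nil (fun k => !skipC.contains k) (123 - qc o) (qc o) hP (qc o)
        (le_refl _) (by omega)
      simpa using this
    cases fuel with
    | zero => exfalso; omega
    | succ f =>
      simp only [incLoop, if_pos hcnt]
      rw [wrapSucc_eq_qc o ho, if_pos hns]
      by_cases hq : qc o = 122
      · have hg0 : g = 0 := by omega
        subst hg0
        rw [hq, show f + 1 - (0 + 1) = f by omega]
      · have hq121 : qc o ≤ 121 := by omega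
        have hP' : prefixCodes skipC (qc (qc o)) = [] := by
          unfold prefixCodes at hP ⊢
          rw [range'_shift (qc o) hq122, List.filter_cons, hns] at hP
          simp only [Bool.not_true, Bool.false_eq_true, if_false] at hP
          rw [qc_of_le121 (qc o) hq121, show 123 - (qc o + 1) = 122 - qc o by omega]
          exact hP
        rw [ih (qc o) cnt f (by omega) (by rw [qc_of_le121 (qc o) hq121]; omega)
          hP' (by omega) hcnt]
        congr 1
        omega

-- closed-form step: nonempty prefix
theorem cf_step_cons (skipC : List Nat) (o p n : Nat) (rest : List Nat) (ho : o ≤ 126)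
    (hP : prefixCodes skipC (qc o) = p :: rest)
    (hcond : allowedCodes skipC ≠ [] ∨ n + 1 ≤ (prefixCodes skipC (qc o)).length) :
    cf skipC o (n + 1) = cf skipC p n := by
  have hq122 : qc o ≤ 122 := qc_le o ho
  obtain ⟨hns, hqp, hp122, hrest⟩ := prefix_cons_elim skipC (qc o) p rest hq122 hP
  by_cases hp : p ≤ 121
  · have hPp : prefixCodes skipC (qc p) = rest := prefix_tail skipC (qc o) p rest hq122 hp hP
    cases n with
    | zero => simp [cf, hP]
    | succ k =>
      simp only [cf, hP, hPp, List.length_cons]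
      split_ifs with h1 h2 h2
      · rw [List.getD_cons_succ]
      · omega
      · omega
      · congr 2
        omega
  · have hp122' : p = 122 := by omega
    subst hp122'
    have hrest' : rest = [] := by
      rw [hrest, show (122 : Nat) - 122 = 0 from rfl]
      simp
    subst hrest'
    have hPp : prefixCodes skipC (qc 122) = allowedCodes skipC := by
      rw [qc_122]; exact prefix_from_97 skipC
    have hmem : (122 : Nat) ∈ allowedCodes skipC := by
      unfold allowedCodes
      rw [List.mem_filter]
      exact ⟨by rw [List.mem_range'_1]; omega, by simpa using hns⟩
    have hm : 1 ≤ (allowedCodes skipC).length := List.length_pos_of_mem hmem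
    cases n with
    | zero => simp [cf, hP]
    | succ k =>
      simp only [cf, hP, hPp, List.length_cons, List.length_nil, Nat.zero_add]
      rw [if_neg (by omega)]
      by_cases h : k + 1 ≤ (allowedCodes skipC).length
      · rw [if_pos h, show k + 1 - 1 = k by omega, Nat.mod_eq_of_lt (by omega)]
      · rw [if_neg h, show k + 1 - 1 = k by omega, Nat.mod_eq_sub_mod (by omega)]

-- closed-form step: empty prefix, jump into the allowed cycle
theorem cf_step_nil (skipC : List Nat) (o p' n : Nat) (restA : List Nat) (ho : o ≤ 126)
    (hP : prefixCodes skipC (qc o) = [])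
    (hA : allowedCodes skipC = p' :: restA) :
    cf skipC o (n + 1) = cf skipC p' n := by
  have hq122 : qc o ≤ 122 := qc_le o ho
  have hA' : prefixCodes skipC 97 = p' :: restA := by rw [prefix_from_97]; exact hA
  obtain ⟨h1, h2, h3, h4⟩ := prefix_cons_elim skipC 97 p' restA (by omega) hA'
  have hns122 : skipC.contains 122 = true := by
    have := fr_nil (fun k => !skipC.contains k) (123 - qc o) (qc o) hP 122
      (by omega) (by omega)
    simpa using this
  have hp'ne : p' ≠ 122 := by
    intro h; rw [h, hns122] at h1; simp at h1
  have hp'121 : p' ≤ 121 := by omega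
  have hPp : prefixCodes skipC (qc p') = restA :=
    prefix_tail skipC 97 p' restA (by omega) hp'121 hA'
  have hm : (allowedCodes skipC).length = restA.length + 1 := by rw [hA]; rfl
  cases n with
  | zero =>
    simp only [cf, hP, hA, List.length_nil]
    norm_num
  | succ k =>
    simp only [cf, hP, hPp, List.length_nil, hm]
    split_ifs with h1' h2 h2
    · omega
    · omega
    · rw [show k + 1 - 0 = k + 1 by omega, Nat.mod_eq_of_lt (by omega), hA,
        List.getD_cons_succ]
    · rw [show k + 1 - 0 = k + 1 by omega, Nat.mod_eq_sub_mod (by omega),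
        show k + 1 - (restA.length + 1) = k - restA.length by omega]

-- main loop invariant: A's loop with enough fuel computes B's closed form
theorem loop_eq_cf (skipC : List Nat) :
    ∀ (n o : Nat) (cnt idx : Int) (fuel : Nat),
      o ≤ 126 → 0 ≤ cnt → cnt + n = idx →
      (allowedCodes skipC ≠ [] ∨ n ≤ (prefixCodes skipC (qc o)).length) →
      149 - qc o + 26 * n ≤ fuel →
      incLoop skipC idx fuel o cnt = cf skipC o n := by
  intro n
  induction n with
  | zero =>
    intro o cnt idx fuel ho hcnt hn hcond hfuel
    have hq : qc o ≤ 122 := qc_le o ho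
    rw [incLoop_done skipC idx fuel o cnt (by omega) (by omega)]
    rfl
  | succ n ih =>
    intro o cnt idx fuel ho hcnt hn hcond hfuel
    have hq : qc o ≤ 122 := qc_le o ho
    have hcnt_lt : cnt < idx := by
      have : (0 : Int) < (n : Int) + 1 := by positivity
      omega
    rcases hPc : prefixCodes skipC (qc o) with _ | ⟨p, rest⟩
    · -- empty prefix: all of [qc o, 122] is skipped; allowed must be nonempty
      have hAne : allowedCodes skipC ≠ [] := by
        rcases hcond with h | h
        · exact h
        · rw [hPc] at h; simp at h
      rcases List.exists_cons_of_ne_nil hAne with ⟨p', restA, hA⟩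
      have hA' : prefixCodes skipC 97 = p' :: restA := by rw [prefix_from_97]; exact hA
      obtain ⟨h1, h2, h3, h4⟩ := prefix_cons_elim skipC 97 p' restA (by omega) hA'
      have hns122 : skipC.contains 122 = true := by
        have := fr_nil (fun k => !skipC.contains k) (123 - qc o) (qc o) hPc 122
          (by omega) (by omega)
        simpa using this
      have hp'ne : p' ≠ 122 := by
        intro h; rw [h, hns122] at h1; simp at h1
      have hP122 : prefixCodes skipC (qc 122) = p' :: restA := by rw [qc_122]; exact hA'
      rw [skipAll skipC idx (123 - qc o) o cnt fuel ho rfl hPc (by omega) hcnt_lt]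
      rw [countStep skipC idx (123 - qc 122) 122 cnt (fuel - (123 - qc o)) p' restA
        (by omega) (le_refl _) hcnt_lt hP122 (by rw [qc_122]; omega)]
      rw [ih p' (cnt + 1) idx _ (by omega) (by omega) (by push_cast at hn ⊢; omega)
        (Or.inl hAne)
        (by rw [qc_of_le121 p' (by omega), qc_122] at *; omega)]
      exact (cf_step_nil skipC o p' n restA ho hPc hA).symm
    · -- nonempty prefix: one counted step to its head p
      obtain ⟨hns, hqp, hp122, hrest⟩ := prefix_cons_elim skipC (qc o) p rest hq hPc
      rw [countStep skipC idx (123 - qc o) o cnt fuel p rest ho (le_refl _) hcnt_lt hPc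
        (by omega)]
      by_cases hp : p ≤ 121
      · have hPp : prefixCodes skipC (qc p) = rest := prefix_tail skipC (qc o) p rest hq hp hPc
        rw [ih p (cnt + 1) idx _ (by omega) (by omega) (by push_cast at hn ⊢; omega)
          (by
            rcases hcond with h | h
            · exact Or.inl h
            · rw [hPc] at h
              rw [hPp]
              right
              simp at h
              omega)
          (by rw [qc_of_le121 p hp]; omega)]
        exact (cf_step_cons skipC o p n rest ho hPc hcond).symm
      · have hp122' : p = 122 := by omega
        subst hp122'
        have hAne : allowedCodes skipC ≠ [] := by
          have hmem : (122 : Nat) ∈ allowedCodes skipC := by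
            unfold allowedCodes
            rw [List.mem_filter]
            exact ⟨by rw [List.mem_range'_1]; omega, by simpa using hns⟩
          exact List.ne_nil_of_mem hmem
        rw [ih 122 (cnt + 1) idx _ (by omega) (by omega) (by push_cast at hn ⊢; omega)
          (Or.inl hAne) (by rw [qc_122]; omega)]
        exact (cf_step_cons skipC o 122 n rest ho hPc hcond).symm

-- per-character equality
theorem char_eq (skipC : List Nat) (o : Nat) (index : Int) (ho : o ≤ 126)
    (hcond : index ≤ 0 ∨ allowedCodes skipC ≠ [] ∨
      index ≤ ((prefixCodes skipC (qc o)).length : Int)) :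
    Char.ofNat (incLoop skipC index (index.toNat * 26 + 160) o 0) =
      (if index ≤ 0 then Char.ofNat o
      else
        if index ≤ ((prefixCodes skipC (qc o)).length : Int) then
          Char.ofNat ((prefixCodes skipC (qc o)).getD (index - 1).toNat 97)
        else Char.ofNat ((allowedCodes skipC).getD
          ((index - ((prefixCodes skipC (qc o)).length : Int) - 1).toNat %
            (allowedCodes skipC).length) 97)) := by
  by_cases hip : index ≤ 0
  · rw [if_pos hip, incLoop_done skipC index _ o 0 (by omega) (by omega)]
  · rw [if_neg hip]
    obtain ⟨k, hk⟩ : ∃ k : Nat, index = (k : Int) + 1 := ⟨(index - 1).toNat, by omega⟩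
    have hq : qc o ≤ 122 := qc_le o ho
    rw [loop_eq_cf skipC (k + 1) o 0 index (index.toNat * 26 + 160) ho (le_refl _)
      (by push_cast; omega)
      (by
        rcases hcond with h | h | h
        · omega
        · exact Or.inl h
        · right; omega)
      (by
        have : index.toNat = k + 1 := by omega
        rw [this]; omega)]
    simp only [cf]
    split_ifs with h1 h2 h2
    · congr 1
      rw [show (index - 1).toNat = k by omega]
    · omega
    · omega
    · have hidx : (index - ((prefixCodes skipC (qc o)).length : Int) - 1).toNat =
        k - (prefixCodes skipC (qc o)).length := by omega
      rw [hidx]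

-- ===== VERDICT (by name: the statement is the Claim_ definition above) =====
theorem solution_spec : Claim_equal_solution := by
  intro s skip index hDom hPre
  unfold Spec_solution
  simp only [solution, solution_alt]
  congr 1
  apply List.map_congr_left
  intro c hc
  have hDomc : c.toNat ≤ 126 := by
    unfold Dom_solution at hDom
    simp only [Bool.and_eq_true] at hDom
    have hs : pvDomStr s = true := hDom.1.1
    unfold pvDomStr at hs
    rw [List.all_eq_true] at hs
    have := hs c hc
    unfold pvDomChar at this
    simp at this
    omega
  unfold Pre_solution at hPre
  rw [List.all_eq_true] at hPre
  have hPrec := hPre c hc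
  have hkey := char_eq (skip.toList.map Char.toNat) c.toNat index hDomc
    (by
      by_cases h0 : index ≤ 0
      · exact Or.inl h0
      by_cases hA : allowedCodes (skip.toList.map Char.toNat) = []
      · right; right
        rw [show qc c.toNat = if 122 ≤ c.toNat then c.toNat - 25 else c.toNat + 1 from rfl]
        have h3 : index ≤ ((prefixCodes (skip.toList.map Char.toNat)
            (if 122 ≤ c.toNat then c.toNat - 25 else c.toNat + 1)).length : Int) := by
          simpa [h0, hA] using hPrec
        exact h3
      · exact Or.inr (Or.inl hA))
  rw [hkey]
  by_cases hip : index ≤ 0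
  · rw [if_pos hip, if_pos hip, Char.ofNat_toNat]
  · rw [if_neg hip, if_neg hip]
    rfl
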